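-- pv_equiv track=rewrite | github.com/Otyg/air-marine | sdr_monitor/app/ingest_adsb_inproc.py | _modes_crc
-- ===== SOURCE A (Python) =====
-- MODE_S_POLY = 0xFFF409
--
-- def _modes_crc(msg_no_parity: int, bit_len: int) -> int:
--     reg = msg_no_parity << 24
--     top_bit = 1 << (bit_len + 23)
--     for _ in range(bit_len):
--         if reg & top_bit:
--             reg ^= MODE_S_POLY << (bit_len - 1)
--         reg <<= 1
--     return (reg >> bit_len) & 0xFFFFFF
-- ===== SOURCE B (Python) =====
-- MODE_S_POLY = 0xFFF409
--
-- def _modes_crc(msg_no_parity: int, bit_len: int) -> int: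
--     # Non-augmented LFSR: keep only a bounded 24-bit register and feed the
--     # message bits in from the top, instead of growing a (bit_len+24)-bit integer.
--     reg = 0
--     for i in range(bit_len - 1, -1, -1):
--         fb = ((reg >> 23) & 1) ^ ((msg_no_parity >> i) & 1)
--         reg = (reg << 1) & 0xFFFFFF
--         if fb:
--             reg ^= MODE_S_POLY
--     return reg
-- ===== Notes on version B (the rewrite author's own statement) =====
-- stated objective: faster
-- what changed: Replaces A's augmented-register division (message pre-shifted by 24 into one ever-growing big integer, fixed top-bit probe, polynomial shifted up by bit_len-1) with a standard non-augmented 24-bit LFSR: a register bounded to 24 bits, fed one message bit per step with the feedback bit XORing in the polynomial directly.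
import Mathlib
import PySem

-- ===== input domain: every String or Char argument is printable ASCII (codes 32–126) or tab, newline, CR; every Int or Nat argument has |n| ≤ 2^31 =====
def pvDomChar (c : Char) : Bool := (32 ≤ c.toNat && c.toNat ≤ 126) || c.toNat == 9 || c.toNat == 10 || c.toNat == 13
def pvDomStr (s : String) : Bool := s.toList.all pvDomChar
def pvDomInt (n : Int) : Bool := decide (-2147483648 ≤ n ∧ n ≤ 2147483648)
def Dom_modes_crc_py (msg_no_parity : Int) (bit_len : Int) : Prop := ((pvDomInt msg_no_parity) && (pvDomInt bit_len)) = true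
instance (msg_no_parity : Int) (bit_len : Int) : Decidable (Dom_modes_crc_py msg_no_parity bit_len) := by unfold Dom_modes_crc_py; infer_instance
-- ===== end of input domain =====

-- B replaces A's ever-growing (bit_len+24)-bit augmented register by a bounded 24-bit
-- LFSR fed one message bit per step (objective: faster — O(bit_len) word operations
-- instead of O(bit_len) big-integer operations; same value whenever bit_len ≥ 0).

-- ===== PORT A =====
-- module constant MODE_S_POLY
def pvModeSPoly : Int := 0xFFF409

-- 'for _ in range(bit_len)': one recursive call per iteration, same state
def pvCrcLoopA (bit_len : Int) (top_bit : Int) : Int → Nat → Int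
  | reg, 0 => reg
  | reg, k+1 =>
    let reg := if PySem.Int.band reg top_bit ≠ 0 then PySem.Int.bxor reg (pvModeSPoly <<< (bit_len - 1).toNat) else reg
    pvCrcLoopA bit_len top_bit (reg <<< (1:Nat)) k

def modes_crc_py (msg_no_parity : Int) (bit_len : Int) : Int :=
  let reg := msg_no_parity <<< (24 : Nat)
  let top_bit := (1 : Int) <<< (bit_len + 23).toNat
  let reg := pvCrcLoopA bit_len top_bit reg bit_len.toNat
  PySem.Int.band (reg >>> bit_len.toNat) 0xFFFFFF

-- ===== PORT B =====
-- 'for i in range(bit_len - 1, -1, -1)': the counter k+1 corresponds to loop index i = k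
def pvCrcLoopB (msg : Int) : Int → Nat → Int
  | reg, 0 => reg
  | reg, i+1 =>
    let fb := PySem.Int.bxor (PySem.Int.band (reg >>> (23 : Nat)) 1) (PySem.Int.band (msg >>> i) 1)
    let reg := PySem.Int.band (reg <<< (1 : Nat)) 0xFFFFFF
    pvCrcLoopB msg (if fb ≠ 0 then PySem.Int.bxor reg pvModeSPoly else reg) i

def modes_crc_py_alt (msg_no_parity : Int) (bit_len : Int) : Int :=
  pvCrcLoopB msg_no_parity 0 bit_len.toNat

-- ===== PRECONDITION & SPEC =====
-- Pre_ excludes bit_len < 0, where A raises ValueError (negative shift count).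
def Pre_modes_crc_py (msg_no_parity : Int) (bit_len : Int) : Prop := 0 ≤ bit_len
instance (msg_no_parity : Int) (bit_len : Int) : Decidable (Pre_modes_crc_py msg_no_parity bit_len) := by unfold Pre_modes_crc_py; infer_instance
def pvWitness_modes_crc_py : Int × Int := (1546, 15)

def Spec_modes_crc_py (msg_no_parity : Int) (bit_len : Int) (out : Int) : Prop := out = modes_crc_py_alt msg_no_parity bit_len
instance (msg_no_parity : Int) (bit_len : Int) (out : Int) : Decidable (Spec_modes_crc_py msg_no_parity bit_len out) := by unfold Spec_modes_crc_py; infer_instance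

-- ===== CLAIM (what is proved, stated in full; the proofs are below) =====
def Claim_equal_modes_crc_py : Prop := ∀ (msg_no_parity : Int) (bit_len : Int), Dom_modes_crc_py msg_no_parity bit_len → Pre_modes_crc_py msg_no_parity bit_len → Spec_modes_crc_py msg_no_parity bit_len (modes_crc_py msg_no_parity bit_len)

lemma pvAddDisj (u : Nat) : ∀ v : Nat, u &&& v = 0 → u + v = u ^^^ v := by
  induction u using Nat.strong_induction_on with
  | _ u ih =>
    intro v h
    rcases Nat.eq_zero_or_pos u with hu | hu
    · simp [hu]
    · have h2 : (u / 2) &&& (v / 2) = 0 := by rw [← Nat.and_div_two, h]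
    -- bottom bits are disjoint
      have hb : u % 2 = 0 ∨ v % 2 = 0 := by
        have h0 : (u &&& v).testBit 0 = false := by simp [h]
        rw [Nat.testBit_land] at h0
        simp only [Nat.testBit_zero, Bool.and_eq_false_iff, decide_eq_false_iff_not] at h0
        rcases h0 with h0 | h0 <;> omega
      have ih2 := ih (u / 2) (by omega) (v / 2) h2
      have hx2 : (u ^^^ v) / 2 = u / 2 ^^^ v / 2 := Nat.xor_div_two
      have hxm : (u ^^^ v) % 2 = (u + v) % 2 := Nat.xor_mod_two_eq
      have e1 : u = 2 * (u / 2) + u % 2 := (Nat.div_add_mod u 2).symm ▸ by omega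
      have e2 : v = 2 * (v / 2) + v % 2 := by omega
      have e3 : u ^^^ v = 2 * ((u ^^^ v) / 2) + (u ^^^ v) % 2 := by omega
      rcases hb with hb | hb <;> omega

lemma pvShlAdd (a M : Nat) (q : Int) :
    ((a : Int) + 2^M * q) <<< (1 : Nat) = ((a <<< 1 : Nat) : Int) + 2^(M+1) * q := by
  rw [Int.shiftLeft_eq]
  push_cast [Nat.shiftLeft_eq]
  ring

lemma pvShrAdd (a M nn : Nat) (q : Int) (h : nn ≤ M) :
    ((a : Int) + 2^M * q) >>> nn = ((a >>> nn : Nat) : Int) + 2^(M - nn) * q := by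
  rw [Int.shiftRight_eq_div_pow]
  have hM : (2:Int)^M * q = (2^nn : Nat) * ((2:Int)^(M-nn) * q) := by
    push_cast
    rw [← mul_assoc, ← pow_add]
    congr 2
    omega
  rw [hM, Int.add_mul_ediv_left _ _ (by positivity)]
  congr 1
  rw [Nat.shiftRight_eq_div_pow]
  exact_mod_cast (Int.natCast_div a (2^nn)).symm

-- Nat: high additive part invisible to &&& below 2^M
lemma pvNatBandHigh (a c M h : Nat) (ha : a < 2^M) (hc : c < 2^M) :
    (2^M * h + a) &&& c = a &&& c := by
  apply Nat.eq_of_testBit_eq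
  intro i
  rw [Nat.testBit_land, Nat.testBit_land, Nat.testBit_two_pow_mul_add _ ha]
  by_cases hi : i < M
  · simp [hi]
  · have : c.testBit i = false := Nat.testBit_lt_two_pow (lt_of_lt_of_le hc (Nat.pow_le_pow_right (by norm_num) (by omega)))
    simp [this]

lemma pvBandLow (a c M : Nat) (q : Int) (ha : a < 2^M) (hc : c < 2^M) :
    PySem.Int.band ((a : Int) + 2^M * q) (c : Int) = ((a &&& c : Nat) : Int) := by
  rcases (by omega : 0 ≤ q ∨ q < 0) with hq | hq
  · obtain ⟨Q, rfl⟩ := Int.eq_ofNat_of_zero_le hq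
    have hx : (a : Int) + 2^M * (Q : Int) = ((a + 2^M * Q : Nat) : Int) := by push_cast; ring
    rw [hx, PySem.Int.band_natCast]
    rw [show a + 2^M * Q = 2^M * Q + a by ring, pvNatBandHigh _ _ _ _ ha hc]
  · -- x < 0
    have hq1 : q ≤ -1 := by omega
    obtain ⟨Q', hq'⟩ : ∃ Q' : Nat, q = -((Q' : Int) + 1) := ⟨(-q - 1).toNat, by omega⟩
    subst hq'
    set z : Nat := 2^M - 1 - a with hz
    have hPa : (a : Int) < 2^M := by exact_mod_cast ha
    have hexp : (2:Int)^M * (-((Q' : Int) + 1)) = -(2^M * (Q':Int)) - 2^M := by ring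
    have hKnn : (0:Int) ≤ 2^M * (Q':Int) := by positivity
    have hxneg : ¬ (0 ≤ (a : Int) + 2^M * (-((Q' : Int) + 1))) := by rw [hexp]; omega
    rw [PySem.Int.band]
    rw [if_neg hxneg, if_pos (by positivity : (0:Int) ≤ (c:Int))]
    have h1 : ((z : Nat) : Int) = 2^M - 1 - a := by
      have h2 : a + 1 ≤ 2^M := ha
      simp only [hz]
      push_cast [Nat.cast_sub (show a ≤ 2^M - 1 by omega), Nat.cast_sub (show 1 ≤ 2^M from Nat.one_le_two_pow)]
      ring
    have hy : (-((a : Int) + 2^M * (-((Q' : Int) + 1))) - 1) = ((2^M * Q' + z : Nat) : Int) := by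
      rw [hexp]
      push_cast [h1]
      ring
    rw [hy]
    have hzlt : z < 2^M := by
      have : 0 < 2^M := Nat.two_pow_pos M
      omega
    simp only [Int.toNat_natCast]
    rw [Nat.and_comm c (2^M * Q' + z), pvNatBandHigh z c M Q' hzlt hc, Nat.and_comm z c]
    -- goal: ↑(c - c &&& z) = ↑(a &&& c)
    have hzbit : ∀ i, z.testBit i = (decide (i < M) && !a.testBit i) := by
      intro i
      rw [show z = 2^M - (a + 1) by omega]
      exact Nat.testBit_two_pow_sub_succ ha i
    have k1 : (c &&& z) &&& (c &&& a) = 0 := by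
      apply Nat.eq_of_testBit_eq
      intro i
      simp [Nat.testBit_land, hzbit i]
      intro h1 h2 h3
      simp [h3]
    have k2 : (c &&& z) ^^^ (c &&& a) = c := by
      apply Nat.eq_of_testBit_eq
      intro i
      rw [Nat.testBit_xor, Nat.testBit_land, Nat.testBit_land, hzbit i]
      by_cases hi : i < M
      · simp [hi]; cases a.testBit i <;> cases c.testBit i <;> rfl
      · have : c.testBit i = false := Nat.testBit_lt_two_pow (lt_of_lt_of_le hc (Nat.pow_le_pow_right (by norm_num) (by omega)))
        simp [this]
    have := pvAddDisj (c &&& z) (c &&& a) k1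
    have hle : c &&& z ≤ c := Nat.and_le_left
    have : c - (c &&& z) = c &&& a := by omega
    rw [this, Nat.and_comm]

lemma pvNatXorHigh (a p M h : Nat) (ha : a < 2^M) (hp : p < 2^M) :
    (2^M * h + a) ^^^ p = 2^M * h + (a ^^^ p) := by
  apply Nat.eq_of_testBit_eq
  intro i
  rw [Nat.testBit_xor, Nat.testBit_two_pow_mul_add _ ha, Nat.testBit_two_pow_mul_add _ (Nat.xor_lt_two_pow ha hp)]
  by_cases hi : i < M
  · simp [hi, Nat.testBit_xor]
  · have : p.testBit i = false := Nat.testBit_lt_two_pow (lt_of_lt_of_le hp (Nat.pow_le_pow_right (by norm_num) (by omega)))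
    simp [hi, this]

lemma pvBxorLow (a p M : Nat) (q : Int) (ha : a < 2^M) (hp : p < 2^M) :
    PySem.Int.bxor ((a : Int) + 2^M * q) (p : Int) = ((a ^^^ p : Nat) : Int) + 2^M * q := by
  rcases (by omega : 0 ≤ q ∨ q < 0) with hq | hq
  · obtain ⟨Q, rfl⟩ := Int.eq_ofNat_of_zero_le hq
    have hx : (a : Int) + 2^M * (Q : Int) = ((2^M * Q + a : Nat) : Int) := by push_cast; ring
    rw [hx, PySem.Int.bxor_natCast, pvNatXorHigh a p M Q ha hp]
    push_cast; ring
  · obtain ⟨Q', hq'⟩ : ∃ Q' : Nat, q = -((Q' : Int) + 1) := ⟨(-q - 1).toNat, by omega⟩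
    subst hq'
    set z : Nat := 2^M - 1 - a with hz
    have hPa : (a : Int) < 2^M := by exact_mod_cast ha
    have hexp : (2:Int)^M * (-((Q' : Int) + 1)) = -(2^M * (Q':Int)) - 2^M := by ring
    have hKnn : (0:Int) ≤ 2^M * (Q':Int) := by positivity
    have hxneg : ¬ (0 ≤ (a : Int) + 2^M * (-((Q' : Int) + 1))) := by rw [hexp]; omega
    rw [PySem.Int.bxor, if_neg hxneg, if_pos (by positivity : (0:Int) ≤ (p:Int))]
    have h2 : a + 1 ≤ 2^M := ha
    have h1 : ((z : Nat) : Int) = 2^M - 1 - a := by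
      simp only [hz]
      push_cast [Nat.cast_sub (show a ≤ 2^M - 1 by omega), Nat.cast_sub (show 1 ≤ 2^M from Nat.one_le_two_pow)]
      ring
    have hy : (-((a : Int) + 2^M * (-((Q' : Int) + 1))) - 1) = ((2^M * Q' + z : Nat) : Int) := by
      rw [hexp]; push_cast [h1]; ring
    rw [hy]
    have hzlt : z < 2^M := by have := Nat.two_pow_pos M; omega
    simp only [Int.toNat_natCast]
    rw [pvNatXorHigh z p M Q' hzlt hp]
    have hzp : z ^^^ p = 2^M - 1 - (a ^^^ p) := by
      apply Nat.eq_of_testBit_eq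
      intro i
      have hzbit : z.testBit i = (decide (i < M) && !a.testBit i) := by
        rw [show z = 2^M - (a + 1) by omega]
        exact Nat.testBit_two_pow_sub_succ ha i
      rw [show 2^M - 1 - (a ^^^ p) = 2^M - ((a ^^^ p) + 1) by omega,
          Nat.testBit_xor, hzbit, Nat.testBit_two_pow_sub_succ (Nat.xor_lt_two_pow ha hp) i]
      by_cases hi : i < M
      · simp [hi, Nat.testBit_xor]
      · have : p.testBit i = false := Nat.testBit_lt_two_pow (lt_of_lt_of_le hp (Nat.pow_le_pow_right (by norm_num) (by omega)))
        simp [hi, this]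
    rw [hzp]
    have hxplt : (a ^^^ p) < 2^M := Nat.xor_lt_two_pow ha hp
    push_cast [Nat.cast_sub (show (a ^^^ p) ≤ 2^M - 1 by omega), Nat.cast_sub (show 1 ≤ 2^M from Nat.one_le_two_pow)]
    ring

def pvLow (n rN j s : Nat) : Nat :=
  (s <<< n) ^^^ ((rN <<< (24 + (n - j))) &&& (2^(n+24) - 1))

lemma pvLow_testBit (n rN j s i : Nat) :
    (pvLow n rN j s).testBit i =
      ((decide (n ≤ i) && s.testBit (i - n)) ^^
        (decide (24 + (n - j) ≤ i) && decide (i < n + 24) && rN.testBit (i - (24 + (n - j))))) := by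
  by_cases h1 : n ≤ i <;> by_cases h2 : 24 + (n - j) ≤ i <;> by_cases h3 : i < n + 24 <;>
    simp [pvLow, Nat.testBit_xor, Nat.testBit_shiftLeft, Nat.and_two_pow_sub_one_eq_mod,
          Nat.testBit_mod_two_pow, h1, h2, h3]

lemma pvLow_lt (n rN j s : Nat) (hs : s < 2^24) : pvLow n rN j s < 2^(n+24) := by
  apply Nat.xor_lt_two_pow
  · rw [Nat.shiftLeft_eq, pow_add, mul_comm (2^n) (2^24)]
    exact (Nat.mul_lt_mul_right (Nat.two_pow_pos n)).mpr hs
  · have h := Nat.and_le_right (n := rN <<< (24 + (n - j))) (m := 2^(n+24) - 1)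
    have := Nat.two_pow_pos (n+24)
    omega

lemma pvNext_lt (s : Nat) (t : Bool) :
    ((s <<< 1) &&& 0xFFFFFF) ^^^ (if t then 0xFFF409 else 0) < 2^24 := by
  apply Nat.xor_lt_two_pow
  · have h := Nat.and_le_right (n := s <<< 1) (m := 0xFFFFFF)
    norm_num at h ⊢
    omega
  · cases t <;> norm_num

-- next-state testBit characterization
lemma pvNext_testBit (s m : Nat) (t : Bool) :
    ((((s <<< 1) &&& 0xFFFFFF) ^^^ (if t then 0xFFF409 else 0)).testBit m) =
      ((decide (m < 24) && decide (1 ≤ m) && s.testBit (m - 1)) ^^ (t && Nat.testBit 0xFFF409 m)) := by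
  have hmask : ∀ m : Nat, Nat.testBit 0xFFFFFF m = decide (m < 24) := by
    intro m
    rw [show (0xFFFFFF : Nat) = 2^24 - 1 by norm_num, Nat.testBit_two_pow_sub_one]
  cases t <;>
    by_cases h1 : m < 24 <;> by_cases h2 : 1 ≤ m <;>
      simp [Nat.testBit_xor, Nat.testBit_land, hmask, Nat.testBit_shiftLeft, h1, h2]

lemma pvStep (n rN j s : Nat) (tb : Bool) (hj : j < n) (hs : s < 2^24)
    (ht : (s.testBit 23).xor (rN.testBit j) = tb) :
    ((pvLow n rN (j+1) s ^^^ (if tb then (0xFFF409 <<< (n-1)) else 0)) <<< 1)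
      = 2^(n+24) * (if tb then 1 else 0) +
        pvLow n rN j (((s <<< 1) &&& 0xFFFFFF) ^^^ (if tb then 0xFFF409 else 0)) := by
  have hn : 1 ≤ n := by omega
  have hs' := pvNext_lt s tb
  apply Nat.eq_of_testBit_eq
  intro i
  rw [Nat.testBit_two_pow_mul_add _ (pvLow_lt n rN j _ hs')]
  rcases Nat.eq_zero_or_pos i with rfl | hi
  · have h024 : (0:Nat) < n + 24 := by omega
    have a1 : ¬ (n ≤ 0) := by omega
    have a2 : ¬ (24 + (n - j) ≤ 0) := by omega
    rw [if_pos h024, pvLow_testBit, Nat.testBit_shiftLeft]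
    simp [a1, a2]
  · obtain ⟨k, rfl⟩ : ∃ k, i = k + 1 := ⟨i - 1, by omega⟩
    rw [Nat.testBit_shiftLeft]
    simp only [ge_iff_le, Nat.le_add_left, decide_true, Bool.true_and, Nat.add_sub_cancel]
    rw [Nat.testBit_xor, pvLow_testBit]
    by_cases hk : k + 1 < n + 24
    · rw [if_pos hk, pvLow_testBit, pvNext_testBit]
      -- all indices below n+24
      by_cases c1 : n ≤ k
      · -- s and P region
        have e1 : n ≤ k + 1 := by omega
        have e2 : k - n = k + 1 - n - 1 := by omega
        have e3 : k + 1 - n < 24 := by omega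
        have e4 : 1 ≤ k + 1 - n := by omega
        by_cases c2 : 24 + (n - j) ≤ k + 1
        · have e5 : 24 + (n - (j+1)) ≤ k := by omega
          have e6 : k - (24 + (n - (j+1))) = k + 1 - (24 + (n - j)) := by omega
          have e7 : k < n + 24 := by omega
          cases tb <;>
            simp [c1, c2, e1, e2, e3, e4, e5, e6, e7, (by omega : k < n + 23), Nat.testBit_shiftLeft,
                  (by omega : n - 1 ≤ k), (by omega : k - (n - 1) = k + 1 - n)] <;>
            cases s.testBit (k + 1 - n - 1) <;> cases Nat.testBit 0xFFF409 (k + 1 - n) <;>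
              cases rN.testBit (k + 1 - (24 + (n - j))) <;> rfl
        · have e5 : ¬ (24 + (n - (j+1)) ≤ k) := by omega
          cases tb <;>
            simp [c1, c2, e1, e2, e3, e4, e5, (by omega : k < n + 23), Nat.testBit_shiftLeft,
                  (by omega : n - 1 ≤ k), (by omega : k - (n - 1) = k + 1 - n)] <;>
            cases s.testBit (k + 1 - n - 1) <;> rfl
      · -- below the s region
        have e1 : ¬ (n ≤ k + 1) ∨ k + 1 = n := by omega
        by_cases c2 : 24 + (n - j) ≤ k + 1
        · have e5 : 24 + (n - (j+1)) ≤ k := by omega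
          have e6 : k - (24 + (n - (j+1))) = k + 1 - (24 + (n - j)) := by omega
          have e7 : k < n + 24 := by omega
          rcases e1 with e1 | e1
          · have e8 : ¬ (n - 1 ≤ k) := by omega
            cases tb <;>
              simp [c1, c2, e1, e5, e6, e7, e8, (by omega : k < n + 23), Nat.testBit_shiftLeft]
          · -- k + 1 = n : P bit 0 enters here when tb
            have e8 : n - 1 ≤ k := by omega
            have e9 : k - (n - 1) = 0 := by omega
            have e10 : n ≤ k + 1 := by omega
            have e11 : k + 1 - n < 24 := by omega
            have e12 : ¬ (1 ≤ k + 1 - n) := by omega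
            cases tb <;>
              simp [c1, c2, e1, e5, e6, e7, e8, e9, e10, e11, e12, (by omega : k < n + 23),
                    (by omega : 24 + (n - j) ≤ n), (by omega : k - (24 + (n - (j+1))) = n - (24 + (n - j))),
                    Nat.testBit_shiftLeft]
        · have e5 : ¬ (24 + (n - (j+1)) ≤ k) := by omega
          rcases e1 with e1 | e1
          · have e8 : ¬ (n - 1 ≤ k) := by omega
            cases tb <;> simp [c1, c2, e1, e5, e8, (by omega : k < n + 23), Nat.testBit_shiftLeft]
          · have e8 : n - 1 ≤ k := by omega
            have e9 : k - (n - 1) = 0 := by omega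
            have e10 : n ≤ k + 1 := by omega
            have e11 : k + 1 - n < 24 := by omega
            have e12 : ¬ (1 ≤ k + 1 - n) := by omega
            cases tb <;>
              simp [c1, c2, e1, e5, e8, e9, e10, e11, e12, (by omega : k < n + 23),
                    Nat.testBit_shiftLeft] <;>
              first
                | exact fun h => absurd h (by omega)
                | exact Or.inl (by omega)
    · rw [if_neg hk]
      -- i ≥ n + 24 : everything escapes except the tested bit at exactly n+24
      by_cases hx : k + 1 = n + 24
      · -- boundary: LHS = s23 ^^ rN j ( ^^ P bit 24 = false ), RHS = tb
        have e1 : n ≤ k := by omega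
        have e2 : k - n = 23 := by omega
        have e3 : 24 + (n - (j+1)) ≤ k := by omega
        have e4 : k < n + 24 := by omega
        have e5 : k - (24 + (n - (j+1))) = j := by omega
        have e6 : k + 1 - (n + 24) = 0 := by omega
        have e7 : n - 1 ≤ k := by omega
        have e8 : k - (n - 1) = 24 := by omega
        have hP : Nat.testBit 0xFFF409 24 = false := by decide
        cases tb <;>
          simp_all [Nat.testBit_shiftLeft, e1, e2, e3, e4, e5, e6, e7, e8]
      · -- strictly above: all false
        have e1 : n ≤ k := by omega
        have e2 : s.testBit (k - n) = false :=
          Nat.testBit_lt_two_pow (lt_of_lt_of_le hs (Nat.pow_le_pow_right (by norm_num) (by omega)))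
        have e4 : ¬ (k < n + 24) := by omega
        have e7 : n - 1 ≤ k := by omega
        have e8 : Nat.testBit 0xFFF409 (k - (n - 1)) = false := by
          have h25 : (0xFFF409 : Nat) < 2^25 := by norm_num
          exact Nat.testBit_lt_two_pow (lt_of_lt_of_le h25 (Nat.pow_le_pow_right (by norm_num) (by omega)))
        have e9 : ¬ (k + 1 - (n + 24) = 0) := by omega
        have e10 : Nat.testBit 1 (k - (n + 23)) = false := by
          rw [show (1:Nat) = 2^0 from rfl, Nat.testBit_two_pow]
          simp
          omega
        cases tb <;>
          simp [Nat.testBit_shiftLeft, e1, e2, e4, e7, e8, e9, e10]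

lemma pvLow_zero (n rN s : Nat) : pvLow n rN 0 s = s <<< n := by
  have h : (rN <<< (24 + (n - 0))) % 2 ^ (n + 24) = 0 := by
    rw [Nat.shiftLeft_eq, show 24 + (n - 0) = n + 24 by omega, mul_comm]
    exact Nat.mul_mod_right _ _
  rw [pvLow, Nat.and_two_pow_sub_one_eq_mod, h, Nat.xor_zero]

lemma pvTestBitTop (n rN j s : Nat) (hj : j < n) :
    (pvLow n rN (j+1) s).testBit (n+23) = ((s.testBit 23).xor (rN.testBit j)) := by
  rw [pvLow_testBit]
  have e1 : n ≤ n + 23 := by omega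
  have e2 : 24 + (n - (j+1)) ≤ n + 23 := by omega
  have e3 : n + 23 < n + 24 := by omega
  have e4 : n + 23 - n = 23 := by omega
  have e5 : n + 23 - (24 + (n - (j+1))) = j := by omega
  simp [e1, e2, e3, e4, e5]



-- (x >>> i) &&& 1 is the i-th bit
lemma pvBitNat (x i : Nat) : (x >>> i) &&& 1 = (x.testBit i).toNat := by
  rw [Nat.and_one_is_mod]
  rcases Nat.mod_two_eq_zero_or_one (x >>> i) with h | h <;>
    simp [Nat.testBit, Nat.and_comm, Nat.and_one_is_mod, h]

-- lockstep simulation of the two loops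
set_option maxHeartbeats 1000000 in
lemma pvSim (msg : Int) (n rN : Nat)
    (hmsg : ∀ i, i < n → PySem.Int.band (msg >>> i) 1 = (((rN >>> i) &&& 1 : Nat) : Int)) :
    ∀ j s (q : Int), j ≤ n → s < 2^24 →
      PySem.Int.band
        ((pvCrcLoopA (n : Int) (((2^(n+23) : Nat) : Int))
            (((pvLow n rN j s : Nat) : Int) + 2^(n+24) * q) j) >>> n) 0xFFFFFF
      = pvCrcLoopB msg ((s : Nat) : Int) j := by
  intro j
  induction j with
  | zero =>
    intro s q _ hs
    rw [pvCrcLoopB, pvCrcLoopA, pvLow_zero]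
    rw [pvShrAdd _ _ n q (by omega)]
    have h1 : (s <<< n) >>> n = s := by
      rw [Nat.shiftLeft_eq, Nat.shiftRight_eq_div_pow]
      exact Nat.mul_div_cancel s (Nat.two_pow_pos n)
    rw [h1, show (0xFFFFFF : Int) = ((0xFFFFFF : Nat) : Int) from rfl,
        show (n+24) - n = 24 by omega,
        pvBandLow s 0xFFFFFF 24 q hs (by norm_num)]
    congr 1
    rw [show (0xFFFFFF : Nat) = 2^24 - 1 by norm_num, Nat.and_two_pow_sub_one_eq_mod]
    exact Nat.mod_eq_of_lt hs
  | succ j ih =>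
    intro s q hj hs
    have hjn : j < n := by omega
    have hlow := pvLow_lt n rN (j+1) s hs
    have htop : (2:Nat)^(n+23) < 2^(n+24) := by
      exact Nat.pow_lt_pow_right (by norm_num) (by omega)
    rw [pvCrcLoopA, pvBandLow _ _ _ q hlow htop]
    rw [Nat.and_two_pow, pvTestBitTop n rN j s hjn]
    -- B side
    rw [pvCrcLoopB]
    have hb1 : PySem.Int.band (((s:Nat):Int) >>> (23:Nat)) 1
        = (((s.testBit 23).toNat : Nat) : Int) := by
      rw [show (((s:Nat):Int)) >>> (23:Nat) = (((s >>> 23 : Nat) : Nat) : Int) from rfl,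
          show (1:Int) = ((1:Nat):Int) from rfl, PySem.Int.band_natCast, pvBitNat]
    have hb2 : PySem.Int.band (msg >>> j) 1 = (((rN.testBit j).toNat : Nat) : Int) := by
      rw [hmsg j hjn, pvBitNat]
    rw [hb1, hb2, PySem.Int.bxor_natCast]
    have hfb : ((s.testBit 23).toNat ^^^ (rN.testBit j).toNat)
        = (((s.testBit 23).xor (rN.testBit j)).toNat) := by
      cases s.testBit 23 <;> cases rN.testBit j <;> rfl
    rw [hfb]
    have hpoly : pvModeSPoly <<< ((n:Int) - 1).toNat
        = (((0xFFF409 <<< (n-1) : Nat) : Nat) : Int) := by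
      rw [show ((n:Int) - 1).toNat = n - 1 by omega]
      rfl
    have hplt : (0xFFF409 : Nat) <<< (n-1) < 2^(n+24) := by
      rw [Nat.shiftLeft_eq]
      calc (0xFFF409 : Nat) * 2^(n-1) < 2^24 * 2^(n-1) := by
            exact (Nat.mul_lt_mul_right (Nat.two_pow_pos (n-1))).mpr (by norm_num)
        _ = 2^(24 + (n-1)) := by rw [pow_add]
        _ ≤ 2^(n+24) := Nat.pow_le_pow_right (by norm_num) (by omega)
    have hs' : ∀ t : Bool, (((s <<< 1) &&& 0xFFFFFF) ^^^ (if t then 0xFFF409 else 0)) < 2^24 :=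
      fun t => pvNext_lt s t
    cases htb : (s.testBit 23).xor (rN.testBit j) with
    | false =>
      -- no feedback
      rw [if_neg (show ¬ ((((Bool.toNat false) * 2^(n+23) : Nat) : Int) ≠ 0) from by simp)]
      rw [if_neg (show ¬ ((((Bool.toNat false : Nat) : Int)) ≠ 0) from by simp)]
      rw [pvShlAdd _ _ q]
      have hstep := pvStep n rN j s false hjn hs htb
      simp only [Bool.false_eq_true, if_false, Nat.xor_zero, Nat.mul_zero, Nat.zero_add] at hstep
      rw [hstep]
      rw [show (2:Int)^(n+24+1) * q = 2^(n+24) * (2 * q) from by ring]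
      have hnext : (s <<< 1) &&& 0xFFFFFF < 2^24 := by
        have := hs' false
        simpa using this
      have := ih ((s <<< 1) &&& 0xFFFFFF) (2 * q) (by omega) hnext
      rw [this]
      congr 1
    | true =>
      have hane : (((Bool.toNat true) * 2^(n+23) : Nat) : Int) ≠ 0 := by
        have h1 : (0:Nat) < (Bool.toNat true) * 2^(n+23) := by
          simp only [Bool.toNat_true, one_mul]
          exact Nat.two_pow_pos (n+23)
        exact Int.natCast_ne_zero.mpr (by omega)
      rw [if_pos hane]
      rw [if_pos (show (((Bool.toNat true : Nat) : Int)) ≠ 0 from by decide)]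
      rw [hpoly, pvBxorLow _ _ _ q hlow hplt, pvShlAdd _ _ q]
      have hstep := pvStep n rN j s true hjn hs htb
      simp only [if_true] at hstep
      rw [hstep]
      have hrw : (((2^(n+24) * 1 + pvLow n rN j (((s <<< 1) &&& 0xFFFFFF) ^^^ 0xFFF409) : Nat)) : Int) + (2:Int)^(n+24+1) * q
          = ((pvLow n rN j (((s <<< 1) &&& 0xFFFFFF) ^^^ 0xFFF409) : Nat) : Int) + (2:Int)^(n+24) * (1 + 2 * q) := by
        push_cast [pow_succ]
        ring
      rw [hrw]
      have hnext : ((s <<< 1) &&& 0xFFFFFF) ^^^ 0xFFF409 < 2^24 := by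
        have := hs' true
        simpa using this
      have := ih (((s <<< 1) &&& 0xFFFFFF) ^^^ 0xFFF409) (1 + 2 * q) (by omega) hnext
      rw [this]
      congr 1

-- ===== VERDICT (by name: the statement is the Claim_ definition above) =====
set_option maxHeartbeats 1000000 in
theorem modes_crc_py_spec : Claim_equal_modes_crc_py := by
  intro msg bl _ hpre
  unfold Spec_modes_crc_py modes_crc_py modes_crc_py_alt
  have h0 : (0:Int) ≤ bl := hpre
  set n : Nat := bl.toNat with hn
  have hbl : bl = (n : Int) := by omega
  have hpow : (0:Int) < 2^n := by positivity
  set q : Int := msg / 2^n with hq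
  set rN : Nat := (msg % 2^n).toNat with hrN
  have hmod : ((rN : Nat) : Int) = msg % 2^n := Int.toNat_of_nonneg (Int.emod_nonneg msg (ne_of_gt hpow))
  have hsplit : msg = (rN : Int) + 2^n * q := by
    have h2 := Int.emod_add_mul_ediv msg ((2:Int)^n)
    rw [hmod, hq]
    linarith
  have hr : rN < 2^n := by
    have h1 : msg % 2^n < 2^n := Int.emod_lt_of_pos msg hpow
    have h2 : ((rN : Nat) : Int) < (2:Int)^n := hmod ▸ h1
    have h3 : (((2:Nat)^n : Nat) : Int) = (2:Int)^n := by push_cast; rfl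
    rw [← h3] at h2
    exact_mod_cast h2
  have hmsg : ∀ i, i < n → PySem.Int.band (msg >>> i) 1 = (((rN >>> i) &&& 1 : Nat) : Int) := by
    intro i hi
    rw [hsplit, pvShrAdd rN n i q (by omega)]
    have ha : rN >>> i < 2^(n-i) := by
      rw [Nat.shiftRight_eq_div_pow]
      apply Nat.div_lt_of_lt_mul
      calc rN < 2^n := hr
        _ = 2^i * 2^(n-i) := by rw [← pow_add]; congr 1; omega
    rw [show (1:Int) = ((1:Nat):Int) from rfl, pvBandLow _ _ _ q ha (by
      have : (0:Nat) < n - i := by omega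
      calc (1:Nat) < 2^1 := by norm_num
        _ ≤ 2^(n-i) := Nat.pow_le_pow_right (by norm_num) (by omega))]
  -- initial register
  have hinit : msg <<< (24:Nat) = ((pvLow n rN n 0 : Nat) : Int) + 2^(n+24) * q := by
    have hlow0 : pvLow n rN n 0 = rN <<< 24 := by
      rw [pvLow]
      have h1 : (0:Nat) <<< n = 0 := Nat.zero_shiftLeft n
      have h2 : (rN <<< (24 + (n - n))) &&& (2^(n+24) - 1) = rN <<< 24 := by
        rw [show 24 + (n - n) = 24 by omega, Nat.and_two_pow_sub_one_eq_mod]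
        apply Nat.mod_eq_of_lt
        rw [Nat.shiftLeft_eq]
        calc rN * 2^24 < 2^n * 2^24 := by
              exact (Nat.mul_lt_mul_right (Nat.two_pow_pos 24)).mpr hr
          _ = 2^(n+24) := by rw [pow_add]
      rw [h1, h2, Nat.zero_xor]
    rw [hlow0, hsplit, Int.shiftLeft_eq]
    push_cast [Nat.shiftLeft_eq, pow_add]
    ring
  have htopbit : (1:Int) <<< (bl + 23).toNat = ((2^(n+23) : Nat) : Int) := by
    rw [show (bl + 23).toNat = n + 23 by omega,
        show (1:Int) = ((1:Nat):Int) from rfl,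
        show (((1:Nat)):Int) <<< (n+23) = (((1 <<< (n+23) : Nat)) : Int) from rfl,
        Nat.one_shiftLeft]
  have hfin := pvSim msg n rN hmsg n 0 q (le_refl n) (by norm_num)
  show PySem.Int.band ((pvCrcLoopA bl ((1:Int) <<< (bl + 23).toNat) (msg <<< (24:Nat)) n) >>> n) 0xFFFFFF
      = pvCrcLoopB msg 0 n
  rw [htopbit, hinit, hbl]
  rw [show ((0:Nat):Int) = (0:Int) from rfl] at hfin
  exact hfin
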